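-- pv_equiv track=rewrite | github.com/w40141/atcoder | abc_247/b.py | check
-- ===== SOURCE A (Python) =====
-- def check(people):
--     for i, p in enumerate(people):
--         sei_p = p[0]
--         mei_p = p[1]
--         sei_flag = False
--         mei_flag = False
--         for j, q in enumerate(people):
--             if i == j:
--                 continue
--             sei_q = q[0]
--             mei_q = q[1]
--             if sei_p == sei_q or sei_p == mei_q:
--                 sei_flag = True
--             if mei_p == sei_q or mei_p == mei_q:
--                 mei_flag = True
--             if sei_flag and mei_flag:
--                 return "No"
--     return "Yes"
-- ===== SOURCE B (Python) =====
-- def check(people):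
--     cnt = {}
--     for s, m in people:
--         cnt[s] = cnt.get(s, 0) + 1
--         cnt[m] = cnt.get(m, 0) + 1
--     for s, m in people:
--         own_s = 1 + (1 if s == m else 0)
--         own_m = 1 + (1 if m == s else 0)
--         if cnt[s] > own_s and cnt[m] > own_m:
--             return "No"
--     return "Yes"
-- ===== Notes on version B (the rewrite author's own statement) =====
-- stated objective: faster
-- what changed: Replaces A's quadratic all-pairs nested scan with a single dictionary counting every name part once, then checks each person against global counts minus their own pair's contributions.
import Mathlib
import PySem

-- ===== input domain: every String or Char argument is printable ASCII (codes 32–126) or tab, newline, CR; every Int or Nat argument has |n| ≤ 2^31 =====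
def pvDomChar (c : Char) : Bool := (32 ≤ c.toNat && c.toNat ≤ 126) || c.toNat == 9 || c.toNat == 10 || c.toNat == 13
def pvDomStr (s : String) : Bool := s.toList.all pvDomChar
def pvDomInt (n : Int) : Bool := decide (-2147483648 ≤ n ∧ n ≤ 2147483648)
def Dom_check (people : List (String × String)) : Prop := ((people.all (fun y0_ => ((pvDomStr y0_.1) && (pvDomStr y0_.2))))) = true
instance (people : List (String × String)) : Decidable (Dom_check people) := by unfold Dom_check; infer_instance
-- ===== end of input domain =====

-- B replaces A's quadratic all-pairs scan by one name-part counter built in a single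
-- pass, checking each person against global counts minus their own contributions (objective: faster).

-- ===== PORT A =====
-- inner `for j, q in enumerate(people)` loop, carrying the two flags; `true` = early `return "No"`
def checkInnerA (i : Int) (sp mp : String) (sf mf : Bool) :
    List (Int × (String × String)) → Bool
  | [] => false
  | (j, q) :: rest =>
    if i == j then checkInnerA i sp mp sf mf rest
    else
      let sf' := if sp == q.1 || sp == q.2 then true else sf
      let mf' := if mp == q.1 || mp == q.2 then true else mf
      if sf' && mf' then true else checkInnerA i sp mp sf' mf' rest

-- outer `for i, p in enumerate(people)` loop
def checkOuterA (all : List (Int × (String × String))) :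
    List (Int × (String × String)) → String
  | [] => "Yes"
  | (i, p) :: rest =>
    if checkInnerA i p.1 p.2 false false all then "No" else checkOuterA all rest

def check (people : List (String × String)) : String :=
  checkOuterA (PySem.List.enumerate people) (PySem.List.enumerate people)

-- ===== PORT B =====
-- first loop of Source B: build the counter of all name parts
def countDictB (people : List (String × String)) : PySem.Dict String Int :=
  people.foldl (fun d p =>
    let d1 := d.insert p.1 (d.getD p.1 0 + 1)
    d1.insert p.2 (d1.getD p.2 0 + 1)) PySem.Dict.empty

-- second loop of Source B, with its early `return "No"`
def checkLoopB (cnt : PySem.Dict String Int) : List (String × String) → String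
  | [] => "Yes"
  | (s, m) :: rest =>
    let own_s : Int := 1 + (if s = m then 1 else 0)
    let own_m : Int := 1 + (if m = s then 1 else 0)
    if own_s < cnt.getD s 0 ∧ own_m < cnt.getD m 0 then "No" else checkLoopB cnt rest

def check_alt (people : List (String × String)) : String :=
  checkLoopB (countDictB people) people

-- ===== PRECONDITION & SPEC =====
def Spec_check (people : List (String × String)) (out : String) : Prop := out = check_alt people
instance (people : List (String × String)) (out : String) : Decidable (Spec_check people out) := by unfold Spec_check; infer_instance

-- ===== CLAIM (what is proved, stated in full; the proofs are below) =====
def Claim_equal_check : Prop := ∀ (people : List (String × String)), Dom_check people → Spec_check people (check people)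

-- ===== LEMMAS AND PROOFS =====

-- "x clashes with the entry (j, q) when j ≠ i": the match test of A's inner loop
def matchN (x : String) (i : Int) (jq : Int × (String × String)) : Bool :=
  (jq.1 != i) && (x == jq.2.1 || x == jq.2.2)

-- how many of the two parts of pair q equal x (x's contribution of pair q to the counter)
def fcnt (x : String) (q : String × String) : Nat :=
  (if x == q.1 then 1 else 0) + (if x == q.2 then 1 else 0)

lemma checkInnerA_eq (i : Int) :
    ∀ (L : List (Int × (String × String))) (sp mp : String) (sf mf : Bool),
      (sf && mf) = false →
      checkInnerA i sp mp sf mf L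
        = ((sf || L.any (matchN sp i)) && (mf || L.any (matchN mp i))) := by
  intro L
  induction L with
  | nil =>
    intro sp mp sf mf h
    simp only [checkInnerA, List.any_nil, Bool.or_false]
    exact h.symm
  | cons hd rest ih =>
    intro sp mp sf mf h
    obtain ⟨j, q⟩ := hd
    by_cases hij : (i == j) = true
    · have hji : (j != i) = false := by
        simp only [beq_iff_eq] at hij
        simp [bne, hij]
      simp only [checkInnerA, hij, if_true, List.any_cons, matchN, hji, Bool.false_and,
        Bool.false_or]
      exact ih sp mp sf mf h
    · have hij' : (i == j) = false := by simpa using hij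
      have hji : (j != i) = true := by
        simp at hij' ⊢
        omega
      simp only [checkInnerA, hij', Bool.false_eq_true, if_false, List.any_cons, matchN, hji,
        Bool.true_and]
      cases hms : (sp == q.1 || sp == q.2) <;> cases hmm : (mp == q.1 || mp == q.2) <;>
        cases sf <;> cases mf <;>
        simp_all [ih sp mp false false rfl, ih sp mp true false rfl, ih sp mp false true rfl]

lemma checkOuterA_eq (all : List (Int × (String × String))) :
    ∀ L, checkOuterA all L
      = if L.any (fun ip => checkInnerA ip.1 ip.2.1 ip.2.2 false false all)
        then "No" else "Yes" := by
  intro L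
  induction L with
  | nil => rfl
  | cons hd tl ih =>
    obtain ⟨i, p⟩ := hd
    simp only [checkOuterA, List.any_cons, ih]
    by_cases hc : checkInnerA i p.1 p.2 false false all = true
    · simp [hc]
    · simp only [Bool.not_eq_true] at hc
      simp only [hc, Bool.false_or, if_neg (Bool.false_ne_true)]

lemma checkLoopB_eq (cnt : PySem.Dict String Int) :
    ∀ L, checkLoopB cnt L
      = if L.any (fun p => decide (((1 + (if p.1 = p.2 then 1 else 0) : Int) < cnt.getD p.1 0)
                        ∧ ((1 + (if p.2 = p.1 then 1 else 0) : Int) < cnt.getD p.2 0)))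
        then "No" else "Yes" := by
  intro L
  induction L with
  | nil => rfl
  | cons hd tl ih =>
    obtain ⟨s, m⟩ := hd
    simp only [checkLoopB, List.any_cons, ih]
    by_cases h : ((1 + (if s = m then 1 else 0) : Int) < cnt.getD s 0)
        ∧ ((1 + (if m = s then 1 else 0) : Int) < cnt.getD m 0)
    · simp [h]
    · rw [if_neg h]
      simp only [decide_eq_false h, Bool.false_or]

-- Source B's first loop is the single-insert counter loop over the flattened list of name parts
lemma countDictB_flat (people : List (String × String)) :
    ∀ d : PySem.Dict String Int,
      people.foldl (fun d p =>
        let d1 := d.insert p.1 (d.getD p.1 0 + 1)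
        d1.insert p.2 (d1.getD p.2 0 + 1)) d
      = (people.flatMap (fun p => [p.1, p.2])).foldl
          (fun d x => d.insert x (d.getD x 0 + 1)) d := by
  induction people with
  | nil => intro d; rfl
  | cons p rest ih =>
    intro d
    simp only [List.foldl_cons, List.flatMap_cons, List.foldl_append]
    exact ih _

lemma count_pair (x a b : String) : [a, b].count x = fcnt x (a, b) := by
  unfold fcnt
  by_cases h1 : x = a <;> by_cases h2 : x = b <;>
    simp [h1, h2, List.count_cons, Bool.beq_comm] <;> ring

lemma count_flat (people : List (String × String)) (x : String) :
    (people.flatMap (fun p => [p.1, p.2])).count x = (people.map (fcnt x)).sum := by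
  induction people with
  | nil => rfl
  | cons p rest ih =>
    simp only [List.flatMap_cons, List.count_append, List.map_cons, List.sum_cons, ih]
    rw [count_pair]

-- the counter holds, for each name x, the total number of name parts equal to x
lemma countDictB_getD (people : List (String × String)) (x : String) :
    (countDictB people).getD x 0 = (((people.map (fcnt x)).sum : Nat) : Int) := by
  unfold countDictB
  rw [countDictB_flat, PySem.Dict.getD_foldl_insert_add_one, PySem.Dict.getD_empty,
    count_flat]
  ring

lemma fcnt_pos_iff (x : String) (q : String × String) :
    0 < fcnt x q ↔ (x == q.1 || x == q.2) = true := by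
  unfold fcnt
  by_cases h1 : x = q.1 <;> by_cases h2 : x = q.2 <;> simp [h1, h2]

-- counts-vs-existence bridge: x (a part of person k) clashes with someone else
-- iff the global count of x exceeds person k's own contribution
lemma any_matchN_iff (people : List (String × String)) (x : String) (k : Nat)
    (hk : k < people.length) :
    ((PySem.List.enumerate people).any (matchN x (k : Int)) = true)
      ↔ fcnt x people[k] < (people.map (fcnt x)).sum := by
  have hsum : (people.map (fcnt x)).sum = ∑ i : Fin people.length, fcnt x people[i] := by
    conv_lhs => rw [← List.ofFn_getElem (xs := people)]
    rw [List.map_ofFn, List.sum_ofFn]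
    simp [Fin.getElem_fin]
  have hk' : (⟨k, hk⟩ : Fin people.length) ∈ (Finset.univ : Finset (Fin people.length)) :=
    Finset.mem_univ _
  rw [List.any_eq_true, hsum, ← Finset.add_sum_erase _ _ hk']
  simp only [Fin.getElem_fin]
  constructor
  · rintro ⟨ip, hip, hm⟩
    rw [PySem.List.mem_enumerate_iff] at hip
    obtain ⟨j, hj, rfl⟩ := hip
    simp only [matchN, zero_add, Bool.and_eq_true, bne_iff_ne, ne_eq, Int.natCast_inj] at hm
    obtain ⟨hjk, hmatch⟩ := hm
    have hfj : 0 < fcnt x people[j] := (fcnt_pos_iff x _).mpr hmatch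
    have hjmem : (⟨j, hj⟩ : Fin people.length)
        ∈ Finset.univ.erase (⟨k, hk⟩ : Fin people.length) := by
      simp [Finset.mem_erase, Fin.ext_iff, hjk]
    have hle := Finset.single_le_sum
      (f := fun i : Fin people.length => fcnt x people[(i : Nat)])
      (fun _ _ => Nat.zero_le _) hjmem
    have hle' : fcnt x people[j]
        ≤ ∑ i ∈ Finset.univ.erase (⟨k, hk⟩ : Fin people.length), fcnt x people[(i : Nat)] := by
      simpa using hle
    omega
  · intro hlt
    obtain ⟨j, hj, hfj⟩ :
        ∃ j ∈ Finset.univ.erase (⟨k, hk⟩ : Fin people.length), 0 < fcnt x people[j] := by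
      by_contra hall
      push Not at hall
      have hz : ∑ i ∈ Finset.univ.erase (⟨k, hk⟩ : Fin people.length),
          fcnt x people[(i : Nat)] = 0 :=
        Finset.sum_eq_zero fun i hi => Nat.le_zero.mp (hall i hi)
      omega
    refine ⟨(((j : Nat) : Int), people[j]), ?_, ?_⟩
    · rw [PySem.List.mem_enumerate_iff]
      exact ⟨j, j.isLt, by simp⟩
    · have hjk : (j : Nat) ≠ k := by
        intro hh
        exact absurd hj (by simp [Finset.mem_erase, Fin.ext_iff, hh])
      simp only [matchN, Bool.and_eq_true, bne_iff_ne, ne_eq, Int.natCast_inj]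
      exact ⟨hjk, (fcnt_pos_iff x _).mp hfj⟩

lemma fcnt_fst (q : String × String) :
    ((fcnt q.1 q : Nat) : Int) = 1 + (if q.1 = q.2 then 1 else 0) := by
  unfold fcnt
  by_cases h : q.1 = q.2 <;> simp [h]

lemma fcnt_snd (q : String × String) :
    ((fcnt q.2 q : Nat) : Int) = 1 + (if q.2 = q.1 then 1 else 0) := by
  unfold fcnt
  by_cases h : q.2 = q.1 <;> simp [h]

-- ===== VERDICT (by name: the statement is the Claim_ definition above) =====
theorem check_spec : Claim_equal_check := by
  unfold Claim_equal_check
  intro people _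
  unfold Spec_check check check_alt
  rw [checkOuterA_eq, checkLoopB_eq]
  have hcond :
      ((PySem.List.enumerate people).any fun ip =>
        checkInnerA ip.1 ip.2.1 ip.2.2 false false (PySem.List.enumerate people))
    = (people.any fun p =>
        decide (((1 + (if p.1 = p.2 then 1 else 0) : Int) < (countDictB people).getD p.1 0)
          ∧ ((1 + (if p.2 = p.1 then 1 else 0) : Int) < (countDictB people).getD p.2 0))) := by
    rw [Bool.eq_iff_iff, List.any_eq_true, List.any_eq_true]
    constructor
    · rintro ⟨ip, hip, hin⟩
      rw [PySem.List.mem_enumerate_iff] at hip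
      obtain ⟨j, hj, rfl⟩ := hip
      simp only [zero_add] at hin
      rw [checkInnerA_eq _ _ _ _ _ _ rfl] at hin
      simp only [Bool.false_or, Bool.and_eq_true] at hin
      have hs := (any_matchN_iff people people[j].1 j hj).mp hin.1
      have hm := (any_matchN_iff people people[j].2 j hj).mp hin.2
      refine ⟨people[j], List.getElem_mem hj, ?_⟩
      rw [decide_eq_true_iff]
      rw [countDictB_getD, countDictB_getD, ← fcnt_fst, ← fcnt_snd]
      exact ⟨by exact_mod_cast hs, by exact_mod_cast hm⟩
    · rintro ⟨p, hp, hcp⟩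
      obtain ⟨j, hj, rfl⟩ := List.mem_iff_getElem.mp hp
      rw [decide_eq_true_iff, countDictB_getD, countDictB_getD, ← fcnt_fst, ← fcnt_snd] at hcp
      have hs : fcnt people[j].1 people[j] < (people.map (fcnt people[j].1)).sum := by
        exact_mod_cast hcp.1
      have hm : fcnt people[j].2 people[j] < (people.map (fcnt people[j].2)).sum := by
        exact_mod_cast hcp.2
      refine ⟨(((j : Nat) : Int), people[j]), ?_, ?_⟩
      · rw [PySem.List.mem_enumerate_iff]
        exact ⟨j, hj, by simp⟩
      · rw [checkInnerA_eq _ _ _ _ _ _ rfl]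
        simp only [Bool.false_or, Bool.and_eq_true]
        exact ⟨(any_matchN_iff people people[j].1 j hj).mpr hs,
               (any_matchN_iff people people[j].2 j hj).mpr hm⟩
  rw [hcond]
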